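-- pv_equiv track=rewrite | github.com/LuisMontenegro21/CypherAlgorithms | algorithms/binary.py | bytes_to_char
-- ===== SOURCE A (Python) =====
-- def bytes_to_char(binary: str) -> str:
--     arr: list = []
--     chunk: str = ""
--     for b in binary:
--         if b != " ":
--             chunk += b
--         elif b == " ":
--             arr.append(chunk)
--             arr.append(" ")
--             chunk = ""
--         else:
--             arr.append(chunk)
--
--     return ''.join(arr)
-- ===== SOURCE B (Python) =====
-- def bytes_to_char(binary: str) -> str:
--     idx = binary.rfind(' ')
--     return binary[:idx + 1]
-- ===== Notes on version B (the rewrite author's own statement) =====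
-- stated objective: simpler
-- what changed: Replaces the char-by-char loop that accumulates chunks into a list with a single rfind of the last space and one closed-form slice binary[:idx+1].
import Mathlib
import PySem

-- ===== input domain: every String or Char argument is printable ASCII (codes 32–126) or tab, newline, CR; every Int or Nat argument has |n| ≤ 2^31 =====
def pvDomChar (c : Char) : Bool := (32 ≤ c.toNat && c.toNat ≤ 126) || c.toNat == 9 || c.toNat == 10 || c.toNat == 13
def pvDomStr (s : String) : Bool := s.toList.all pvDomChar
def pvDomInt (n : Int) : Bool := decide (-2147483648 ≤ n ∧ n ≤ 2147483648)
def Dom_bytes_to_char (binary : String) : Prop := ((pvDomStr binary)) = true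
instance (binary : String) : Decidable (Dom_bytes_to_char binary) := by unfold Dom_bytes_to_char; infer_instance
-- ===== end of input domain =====

-- B replaces the accumulation loop with one rfind of the last space and a closed-form slice (simpler).

-- ===== PORT A =====
-- A's loop body: state = (arr : list of pieces, chunk); chars handled at the PySem.Chars level
def pvStepA (s : List (List Char) × List Char) (b : Char) : List (List Char) × List Char :=
  if b ≠ ' ' then (s.1, s.2 ++ [b])
  else if b = ' ' then (s.1 ++ [s.2] ++ [[' ']], [])
  else (s.1 ++ [s.2], s.2)

def bytes_to_char (binary : String) : String :=
  let st := binary.toList.foldl pvStepA ([], [])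
  String.ofList (PySem.Chars.join [] st.1)

-- ===== PORT B =====
def bytes_to_char_alt (binary : String) : String :=
  let idx : Int := PySem.Chars.rfind binary.toList [' ']
  String.ofList (PySem.List.slice binary.toList none (some (idx + 1)))

-- ===== PRECONDITION & SPEC =====
def Spec_bytes_to_char (binary : String) (out : String) : Prop := out = bytes_to_char_alt binary
instance (binary : String) (out : String) : Decidable (Spec_bytes_to_char binary out) := by unfold Spec_bytes_to_char; infer_instance

-- ===== CLAIM (what is proved, stated in full; the proofs are below) =====
def Claim_equal_bytes_to_char : Prop := ∀ (binary : String), Dom_bytes_to_char binary → Spec_bytes_to_char binary (bytes_to_char binary)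

-- ===== LEMMAS AND PROOFS =====

-- the common characterization: everything up to and including the last space, reversed
def pvTail (l : List Char) : List Char := l.reverse.dropWhile (fun c => decide (c ≠ ' '))

lemma pvTail_append_nonspace (l : List Char) (c : Char) (hc : c ≠ ' ') :
    pvTail (l ++ [c]) = pvTail l := by
  simp [pvTail, hc]

lemma pvTail_append_space (l : List Char) :
    pvTail (l ++ [' ']) = ' ' :: l.reverse := by
  simp [pvTail]

lemma pvStepA_space (s : List (List Char) × List Char) :
    pvStepA s ' ' = (s.1 ++ [s.2] ++ [[' ']], []) := by
  simp [pvStepA]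

lemma pvStepA_nonspace (s : List (List Char) × List Char) (c : Char) (hc : c ≠ ' ') :
    pvStepA s c = (s.1, s.2 ++ [c]) := by
  simp [pvStepA, hc]

-- invariant of A's fold
lemma foldA_spec (l : List Char) :
    (l.foldl pvStepA ([], [])).1.flatten = (pvTail l).reverse ∧
    (l.foldl pvStepA ([], [])).1.flatten ++ (l.foldl pvStepA ([], [])).2 = l := by
  induction l using List.reverseRecOn with
  | nil => simp [pvTail]
  | append_singleton l c ih =>
    rw [List.foldl_append, List.foldl_cons, List.foldl_nil]
    by_cases hc : c = ' '
    · subst hc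
      rw [pvStepA_space]
      refine ⟨?_, ?_⟩
      · simp [pvTail_append_space, ih.1]
        rw [← List.append_assoc, ← ih.1, ih.2]
      · simp only [List.append_assoc, List.flatten_append, List.flatten_cons, List.flatten_nil,
          List.append_nil]
        rw [← List.append_assoc, ih.2]
    · rw [pvStepA_nonspace _ _ hc]
      refine ⟨?_, ?_⟩
      · simpa [pvTail_append_nonspace l c hc] using ih.1
      · simp only []
        rw [← List.append_assoc, ih.2]

-- rfind.go characterized by pvTail of a prefix
lemma rfind_go_spec (s : List Char) (n : Nat) :
    PySem.Chars.rfind.go s [' '] n = ((pvTail (s.take (n + 1))).length : Int) - 1 := by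
  induction n with
  | zero =>
    show (if [' '].isPrefixOf s then (0 : Int) else -1) = _
    match s with
    | [] => simp [pvTail, List.isPrefixOf]
    | c :: t =>
      by_cases hc : c = ' '
      · subst hc; simp [List.isPrefixOf, pvTail]
      · simp [List.isPrefixOf, Ne.symm hc, pvTail, hc]
  | succ n ih =>
    show (if [' '].isPrefixOf (s.drop (n + 1)) then ((n : Int) + 1) else PySem.Chars.rfind.go s [' '] n) = _
    by_cases hlen : n + 1 < s.length
    · have hget : s.drop (n + 1) = s[n + 1] :: s.drop (n + 2) := List.drop_eq_getElem_cons hlen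
      have htake : s.take (n + 2) = s.take (n + 1) ++ [s[n + 1]] := by
        rw [List.take_add_one]; simp [hlen]
      by_cases hc : s[n + 1] = ' '
      · rw [hget]
        have hp : [' '].isPrefixOf (s[n+1] :: s.drop (n+2)) = true := by
          simp [List.isPrefixOf, hc]
        rw [hp, if_pos rfl, htake, hc, pvTail_append_space]
        have hl : (s.take (n+1)).length = n + 1 := by
          simp [Nat.le_of_lt hlen]
        simp [hl]
      · rw [hget]
        have hp : [' '].isPrefixOf (s[n+1] :: s.drop (n+2)) = false := by
          simp [List.isPrefixOf, Ne.symm hc]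
        rw [hp]
        simp only [Bool.false_eq_true, if_false, ih]
        rw [htake, pvTail_append_nonspace _ _ hc]
    · have h1 : s.take (n + 2) = s.take (n + 1) := by
        rw [List.take_of_length_le (by omega), List.take_of_length_le (by omega)]
      have h2 : s.drop (n + 1) = [] := List.drop_of_length_le (by omega)
      rw [h2, h1, ← ih]
      simp [List.isPrefixOf]

lemma rfind_spec (s : List Char) :
    PySem.Chars.rfind s [' '] = ((pvTail s).length : Int) - 1 := by
  show PySem.Chars.rfind.go s [' '] s.length = _
  rw [rfind_go_spec]
  congr 2
  rw [List.take_of_length_le (by omega)]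

lemma rev_take (a b : List Char) : (b ++ a).reverse.take a.length = a.reverse := by
  rw [List.reverse_append]
  exact List.take_left' (by simp)

lemma take_pvTail_length (l : List Char) :
    l.take (pvTail l).length = (pvTail l).reverse := by
  have h := rev_take (l.reverse.dropWhile (fun c => decide (c ≠ ' ')))
    (l.reverse.takeWhile (fun c => decide (c ≠ ' ')))
  rw [List.takeWhile_append_dropWhile, List.reverse_reverse] at h
  exact h

lemma intercalate_nil_flatten (L : List (List Char)) :
    ([] : List Char).intercalate L = L.flatten := by
  induction L with
  | nil => simp [List.intercalate]
  | cons x t ih =>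
    cases t with
    | nil => simp [List.intercalate]
    | cons y t' =>
      simp only [List.intercalate, List.intersperse] at ih ⊢
      simp_all

-- ===== VERDICT (by name: the statement is the Claim_ definition above) =====
theorem bytes_to_char_spec : Claim_equal_bytes_to_char := by
  intro binary _
  show _ = _
  unfold bytes_to_char bytes_to_char_alt
  simp only [PySem.Chars.join, intercalate_nil_flatten, rfind_spec]
  rw [(foldA_spec binary.toList).1]
  have h : ((pvTail binary.toList).length : Int) - 1 + 1 = ((pvTail binary.toList).length : Int) := by ring
  rw [h, PySem.List.slice_to, Int.toNat_natCast, take_pvTail_length]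
  positivity
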